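-- pv_equiv track=rewrite | github.com/tbnsok40/Algorithm-Python | 21SEP/20SEP 위클리4주차.py | solution
-- ===== SOURCE A (Python) =====
-- def solution(table, languages, preference):
--     table_dict = {}
--     for t in table:
--         word = t.split(' ')
--         table_dict[word[0]] = [0] + word[1:][::-1]
--
--     result = dict()
--     for key, value in table_dict.items():
--         result[key] = 0
--         for point, lang in zip(preference, languages):
--             try:
--                 result[key] += (value.index(lang) * point)
--             except ValueError:
--                 pass
--     answer = [key for key, val in result.items() if max(result.values()) == val]
--
--     return sorted(answer)[0]
-- ===== SOURCE B (Python) =====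
-- def solution(table, languages, preference):
--     # weight per language: total preference points for that language
--     wt = {}
--     for point, lang in zip(preference, languages):
--         wt[lang] = wt.get(lang, 0) + point
--     # score per job name (later rows with the same name overwrite earlier ones)
--     scores = {}
--     for t in table:
--         name, *langs = t.split(' ')
--         n = len(langs)
--         rank = {}
--         for i, lang in enumerate(langs):
--             rank[lang] = n - i          # last occurrence wins, as A's reversed .index does
--         scores[name] = sum(r * wt.get(lang, 0) for lang, r in rank.items())
--     return min(scores, key=lambda k: (-scores[k], k))
-- ===== Notes on version B (the rewrite author's own statement) =====
-- stated objective: faster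
-- what changed: B precomputes a language->total-points weight map and a per-row last-occurrence rank map (one enumerate pass over the row's own languages), replacing A's per-(job,preference) list .index scans, and selects the winner with a single lexicographic min over (-score, name) instead of A's re-evaluating max(result.values()) inside the answer comprehension (quadratic in the number of jobs) followed by a sort.
import Mathlib
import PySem

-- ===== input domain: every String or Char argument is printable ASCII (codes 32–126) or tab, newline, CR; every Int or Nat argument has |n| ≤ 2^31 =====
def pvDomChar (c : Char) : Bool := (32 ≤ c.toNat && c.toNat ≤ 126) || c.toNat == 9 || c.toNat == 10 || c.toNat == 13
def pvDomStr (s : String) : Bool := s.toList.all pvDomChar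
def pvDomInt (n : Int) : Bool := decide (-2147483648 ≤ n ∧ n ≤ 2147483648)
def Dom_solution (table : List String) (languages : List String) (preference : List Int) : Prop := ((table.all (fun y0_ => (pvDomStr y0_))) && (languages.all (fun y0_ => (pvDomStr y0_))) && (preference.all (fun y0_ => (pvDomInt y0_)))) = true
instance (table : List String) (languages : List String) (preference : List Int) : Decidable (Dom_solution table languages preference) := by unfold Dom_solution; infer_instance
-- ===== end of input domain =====

-- B replaces A's per-language .index scans and the quadratic max-recomputation by a prebuilt
-- weight map, one enumerate pass per row and a single lexicographic min (objective: faster).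

-- ===== PORT A =====
-- A's Python list '[0] + word[1:][::-1]' mixes the int 0 with strings; it is ported as
-- 'List (Option String)' with 'none' for the 0 sentinel (no language, a string, ever equals it).
def solution (table : List String) (languages : List String) (preference : List Int) : String :=
  let table_dict : PySem.Dict String (List (Option String)) :=
    table.foldl (fun d t =>
      let word := (PySem.Str.split? t " ").getD []   -- sep " " ≠ "": split? never returns none
      d.insert (word.headD "") (none :: ((PySem.List.slice word (some 1) none).reverse.map some)))
      PySem.Dict.empty
  let result : PySem.Dict String Int :=
    table_dict.items.foldl (fun r kv =>
      let r := r.insert kv.1 0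
      (preference.zip languages).foldl (fun r pl =>
        match PySem.List.index? kv.2 (some pl.2) with   -- try/except ValueError: none = not found
        | some i => r.insert kv.1 (r.getD kv.1 0 + (i : Int) * pl.1)
        | none => r) r)
      PySem.Dict.empty
  let answer : List String :=
    result.items.foldl (fun acc kv =>
      if PySem.List.max? result.values (fun v => v) == some kv.2 then acc ++ [kv.1] else acc) []
  (PySem.List.pyGet? (PySem.List.sorted answer (fun x => x) false) 0).getD ""   -- none (IndexError) only for empty 'table', excluded by Pre_

-- ===== PORT B =====
def solution_alt (table : List String) (languages : List String) (preference : List Int) : String :=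
  let wt : PySem.Dict String Int :=
    (preference.zip languages).foldl (fun d pl => d.insert pl.2 (d.getD pl.2 0 + pl.1)) PySem.Dict.empty
  let scores : PySem.Dict String Int :=
    table.foldl (fun s t =>
      let word := (PySem.Str.split? t " ").getD []   -- sep " " ≠ "": split? never returns none
      let langs := word.drop 1
      let n : Int := langs.length
      let rank : PySem.Dict String Int :=
        (PySem.List.enumerate langs).foldl (fun r il => r.insert il.2 (n - il.1)) PySem.Dict.empty
      s.insert (word.headD "") (rank.items.foldl (fun acc lr => acc + lr.2 * wt.getD lr.1 0) 0))
      PySem.Dict.empty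
  (PySem.List.min2? scores.keys (fun k => -(scores.getD k 0)) (fun k => k)).getD ""   -- none (ValueError) only for empty 'table', excluded by Pre_

-- ===== PRECONDITION & SPEC =====
-- Pre_ excludes only the empty table, on which A raises IndexError (B's min raises ValueError there too).
def Pre_solution (table : List String) (languages : List String) (preference : List Int) : Prop := table ≠ []
instance (table : List String) (languages : List String) (preference : List Int) : Decidable (Pre_solution table languages preference) := by unfold Pre_solution; infer_instance
def pvWitness_solution : List String × List String × List Int := (["jobA python c", "jobB c"], ["python", "c"], [4, 2])
def Spec_solution (table : List String) (languages : List String) (preference : List Int) (out : String) : Prop := out = solution_alt table languages preference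
instance (table : List String) (languages : List String) (preference : List Int) (out : String) : Decidable (Spec_solution table languages preference out) := by unfold Spec_solution; infer_instance

-- ===== CLAIM (what is proved, stated in full; the proofs are below) =====
def Claim_equal_solution : Prop := ∀ (table : List String) (languages : List String) (preference : List Int), Dom_solution table languages preference → Pre_solution table languages preference → Spec_solution table languages preference (solution table languages preference)

-- ===== LEMMAS AND PROOFS =====

-- Abbreviations for the pieces both ports share (used only by the proofs below).
def pvWord (t : String) : List String := (PySem.Str.split? t " ").getD []
def pvName (t : String) : String := (pvWord t).headD ""
def pvLangs (t : String) : List String := (pvWord t).drop 1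
def pvConv (t : String) : List (Option String) := none :: ((pvLangs t).reverse.map some)
def pvTermA (v : List (Option String)) (l : String) : Int :=
  match PySem.List.index? v (some l) with | some i => (i : Int) | none => 0
def pvSA (v : List (Option String)) (zs : List (Int × String)) : Int :=
  (zs.map (fun pl => pvTermA v pl.2 * pl.1)).sum
def pvWt (zs : List (Int × String)) : PySem.Dict String Int :=
  zs.foldl (fun d pl => d.insert pl.2 (d.getD pl.2 0 + pl.1)) PySem.Dict.empty
def pvRank (langs : List String) : PySem.Dict String Int :=
  (PySem.List.enumerate langs).foldl (fun r il => r.insert il.2 ((langs.length : Int) - il.1)) PySem.Dict.empty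
def pvScoreB (zs : List (Int × String)) (t : String) : Int :=
  (pvRank (pvLangs t)).items.foldl (fun acc lr => acc + lr.2 * (pvWt zs).getD lr.1 0) 0
def myLE (k1 : String → Int) (a b : String) : Prop := k1 a < k1 b ∨ (k1 a = k1 b ∧ a ≤ b)

theorem myLE_trans {k1 : String → Int} {a b c : String} (h1 : myLE k1 a b) (h2 : myLE k1 b c) : myLE k1 a c := by
  rcases h1 with h1 | ⟨h1, h1'⟩ <;> rcases h2 with h2 | ⟨h2, h2'⟩
  · exact Or.inl (lt_trans h1 h2)
  · exact Or.inl (h2 ▸ h1)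
  · exact Or.inl (h1 ▸ h2)
  · exact Or.inr ⟨h1.trans h2, le_trans h1' h2'⟩

-- A's inner zip-loop threading the result dict adds pvSA to the freshly set entry.
theorem inner_fold (v : List (Option String)) (key : String) : ∀ (zs : List (Int × String)) (r : PySem.Dict String Int) (c : Int),
    zs.foldl (fun r pl =>
      match PySem.List.index? v (some pl.2) with
      | some i => r.insert key (r.getD key 0 + (i : Int) * pl.1)
      | none => r) (r.insert key c)
    = r.insert key (c + pvSA v zs) := by
  intro zs
  induction zs with
  | nil => intro r c; simp [pvSA]
  | cons pl rest ih =>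
    intro r c
    simp only [List.foldl_cons]
    cases h : PySem.List.index? v (some pl.2) with
    | none =>
      rw [ih r c]
      have : pvSA v (pl :: rest) = pvSA v rest := by
        simp only [pvSA, pvTermA, List.map_cons, List.sum_cons, h]
        ring
      rw [this]
    | some i =>
      simp only [PySem.Dict.getD_insert_self, PySem.Dict.insert_insert_self]
      rw [ih r (c + (i : Int) * pl.1)]
      have : c + (i : Int) * pl.1 + pvSA v rest = c + pvSA v (pl :: rest) := by
        simp only [pvSA, pvTermA, List.map_cons, List.sum_cons, h]
        ring
      rw [this]

-- getD of an insert-loop: the LAST matching element wins, else the initial dict.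
theorem getD_fold_ins {β : Type} (k : β → String) (v : β → Int) (x : String) : ∀ (l : List β) (d : PySem.Dict String Int),
    (l.foldl (fun d b => d.insert (k b) (v b)) d).getD x 0
    = (match l.reverse.find? (fun b => k b == x) with | some b => v b | none => d.getD x 0) := by
  intro l
  induction l with
  | nil => intro d; simp
  | cons b rest ih =>
    intro d
    simp only [List.foldl_cons, List.reverse_cons, List.find?_append]
    rw [ih (d.insert (k b) (v b))]
    cases hf : rest.reverse.find? (fun b => k b == x) with
    | some b' => simp
    | none =>
      simp only []
      by_cases hk : k b = x
      · subst hk; simp [PySem.Dict.getD_insert_self]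
      · have hb : (k b == x) = false := by simpa using hk
        simp [List.find?, PySem.Dict.getD_insert, Ne.symm hk, hb]

-- last-occurrence search over enumerate, as first-occurrence in the reversed list
theorem find_enum (l : String) : ∀ (langs : List String) (s : Int),
    ((PySem.List.enumerate langs s).reverse.find? (fun il => il.2 == l))
    = (PySem.List.index? langs.reverse l).map (fun j => ((s + ((langs.length - 1 - j : Nat) : Int)), l)) := by
  intro langs
  induction langs with
  | nil => intro s; simp [PySem.List.enumerate_nil, PySem.List.index?]
  | cons x rest ih =>
    intro s
    rw [PySem.List.enumerate_cons, List.reverse_cons, List.find?_append, ih (s + 1),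
      List.reverse_cons]
    by_cases hm : l ∈ rest.reverse
    · rw [PySem.List.index?_append_of_mem _ hm]
      cases hj : PySem.List.index? rest.reverse l with
      | none => exact absurd ((PySem.List.index?_eq_none_iff _ _).mp hj) (by simpa using hm)
      | some j =>
        obtain ⟨hk, -, -⟩ := PySem.List.getElem_of_index?_eq_some hj
        simp only [List.length_reverse] at hk
        simp only [Option.map_some, Option.some_or, List.length_cons,
          Option.some.injEq, Prod.mk.injEq]
        exact ⟨by omega, trivial⟩
    · rw [(PySem.List.index?_eq_none_iff _ _).mpr hm]
      simp only [Option.map_none, Option.none_or]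
      by_cases hx : x = l
      · subst hx
        rw [PySem.List.index?_append_singleton_self _ _ hm]
        have h0 : rest.length + 1 - 1 - rest.reverse.length = 0 := by
          simp only [List.length_reverse]; omega
        simp [List.find?]
      · have : l ∉ rest.reverse ++ [x] := by
          intro hcon; rcases List.mem_append.mp hcon with h | h
          · exact hm h
          · exact hx (List.mem_singleton.mp h).symm
        rw [(PySem.List.index?_eq_none_iff _ _).mpr this]
        have hb : (x == l) = false := by simpa using hx
        simp [List.find?, hb]

theorem index?_map_some (l : String) : ∀ (ys : List String),
    PySem.List.index? (ys.map some) (some l) = PySem.List.index? ys l := by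
  intro ys
  induction ys with
  | nil => rfl
  | cons y rest ih =>
    by_cases hy : y = l
    · subst hy
      rw [List.map_cons, PySem.List.index?_cons_self, PySem.List.index?_cons_self]
    · rw [List.map_cons, PySem.List.index?_cons_of_ne _ (by simpa using hy),
        PySem.List.index?_cons_of_ne _ hy, ih]

-- A's rank (1 + index in the reversed language list, 0 when absent) IS B's rank dict lookup.
theorem termA_eq_rank (langs : List String) (l : String) :
    pvTermA (none :: (langs.reverse.map some)) l = (pvRank langs).getD l 0 := by
  unfold pvRank
  rw [getD_fold_ins (fun il : Int × String => il.2) (fun il : Int × String => ((langs.length : Nat) : Int) - il.1) l,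
    find_enum l langs 0]
  unfold pvTermA
  rw [PySem.List.index?_cons_of_ne _ (by simp : (none : Option String) ≠ some l),
    index?_map_some]
  cases hj : PySem.List.index? langs.reverse l with
  | none => simp [PySem.Dict.getD_empty]
  | some j =>
    obtain ⟨hk, -, -⟩ := PySem.List.getElem_of_index?_eq_some hj
    simp only [List.length_reverse] at hk
    simp only [Option.map_some]
    have h1 : langs.length - 1 - j = langs.length - (j + 1) := by omega
    rw [h1, Nat.cast_sub (by omega : j + 1 ≤ langs.length)]
    push_cast
    ring

-- one nonzero summand: a sum of if-matches over items with distinct keys is the dict lookup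
theorem sum_if_items (rank : PySem.Dict String Int) (hnd : rank.keys.Nodup) (c : String) (p : Int) :
    (rank.items.map (fun lr => if lr.1 = c then lr.2 * p else 0)).sum = rank.getD c 0 * p := by
  have hsum0 : ∀ (u : List (String × Int)), (∀ x ∈ u, x.1 ≠ c) →
      (u.map (fun lr => if lr.1 = c then lr.2 * p else 0)).sum = 0 := by
    intro u hu
    apply List.sum_eq_zero
    intro y hy
    obtain ⟨x, hx, rfl⟩ := List.mem_map.mp hy
    simp [hu x hx]
  have hkeys : rank.keys = rank.items.map (·.1) := by simp only [PySem.Dict.keys]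
  by_cases hc : c ∈ rank.items.map (·.1)
  · obtain ⟨lr, hlr, hfst⟩ := List.mem_map.mp hc
    obtain ⟨l1, l2⟩ := lr
    change l1 = c at hfst
    subst hfst
    obtain ⟨sl, tl, hst⟩ := List.append_of_mem hlr
    have hg : rank.getD l1 0 = l2 := PySem.Dict.getD_of_mem_items _ hlr hnd 0
    have hnd2 : (sl.map (·.1) ++ l1 :: tl.map (·.1)).Nodup := by
      have h := hnd
      rw [hkeys, hst] at h
      simpa using h
    have hA : l1 ∉ sl.map (·.1) := fun hmem =>
      (List.disjoint_of_nodup_append hnd2) hmem (by simp)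
    have hB : l1 ∉ tl.map (·.1) := (List.nodup_cons.mp (List.Nodup.of_append_right hnd2)).1
    have hs1 : ∀ x ∈ sl, x.1 ≠ l1 := fun x hx hxc => hA (List.mem_map.mpr ⟨x, hx, hxc⟩)
    have hs2 : ∀ x ∈ tl, x.1 ≠ l1 := fun x hx hxc => hB (List.mem_map.mpr ⟨x, hx, hxc⟩)
    rw [hst, List.map_append, List.map_cons, List.sum_append, List.sum_cons,
      hsum0 sl hs1, hsum0 tl hs2, if_pos rfl, hg]
    ring
  · have hget : rank.getD c 0 = 0 := by
      apply PySem.Dict.getD_of_not_contains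
      rw [PySem.Dict.contains_eq_decide_mem_keys, hkeys]
      simpa using hc
    rw [hget, hsum0 rank.items (by intro x hx hxc; exact hc (List.mem_map.mpr ⟨x, hx, hxc⟩))]
    ring

-- exchange of summation: B's sum over the rank dict against the finished weight map equals
-- the sum over the zip pairs of rank-lookup times point.
theorem sum_exchange (rank : PySem.Dict String Int) (hnd : rank.keys.Nodup) : ∀ (zs : List (Int × String)) (d : PySem.Dict String Int),
    (rank.items.map (fun lr => lr.2 * ((zs.foldl (fun d pl => d.insert pl.2 (d.getD pl.2 0 + pl.1)) d).getD lr.1 0))).sum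
    = (rank.items.map (fun lr => lr.2 * d.getD lr.1 0)).sum + (zs.map (fun pl => rank.getD pl.2 0 * pl.1)).sum := by
  intro zs
  induction zs with
  | nil => intro d; simp
  | cons pl rest ih =>
    intro d
    simp only [List.foldl_cons, List.map_cons, List.sum_cons]
    rw [ih (d.insert pl.2 (d.getD pl.2 0 + pl.1))]
    have hpt : rank.items.map (fun lr => lr.2 * (d.insert pl.2 (d.getD pl.2 0 + pl.1)).getD lr.1 0)
        = rank.items.map (fun lr => lr.2 * d.getD lr.1 0 + (if lr.1 = pl.2 then lr.2 * pl.1 else 0)) := by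
      apply List.map_congr_left
      intro lr _
      rw [PySem.Dict.getD_insert]
      split_ifs with hc
      · rw [hc]; ring
      · ring
    rw [hpt, PySem.List.sum_map_add_int, sum_if_items rank hnd pl.2 pl.1]
    ring

theorem rank_keys_nodup (langs : List String) : (pvRank langs).keys.Nodup := by
  unfold pvRank
  exact PySem.Dict.nodup_keys_foldl_insert_key _ _ _ _ PySem.Dict.nodup_keys_empty

-- per-row equality of the two scores
theorem row_eq (zs : List (Int × String)) (t : String) : 0 + pvSA (pvConv t) zs = pvScoreB zs t := by
  unfold pvScoreB
  rw [PySem.List.foldl_add]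
  unfold pvWt
  rw [sum_exchange (pvRank (pvLangs t)) (rank_keys_nodup _) zs PySem.Dict.empty]
  have h0 : ((pvRank (pvLangs t)).items.map (fun lr => lr.2 * PySem.Dict.empty.getD lr.1 0)).sum = 0 := by
    apply List.sum_eq_zero
    intro y hy
    obtain ⟨x, hx, rfl⟩ := List.mem_map.mp hy
    simp [PySem.Dict.getD_empty]
  rw [h0]
  have hpt : (fun pl : Int × String => pvTermA (pvConv t) pl.2 * pl.1)
      = (fun pl : Int × String => (pvRank (pvLangs t)).getD pl.2 0 * pl.1) := by
    funext pl
    rw [show pvConv t = none :: ((pvLangs t).reverse.map some) from rfl, termA_eq_rank]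
  rw [pvSA, hpt]
  ring

-- two insert-loops over the same keys with pointwise-related values build pointwise-related dicts
theorem parfold {V1 V2 : Type} (F : V1 → V2) (key : String → String) (g1 : String → V1) (g2 : String → V2)
    (hg : ∀ t, F (g1 t) = g2 t) : ∀ (ts : List String) (d1 : PySem.Dict String V1) (d2 : PySem.Dict String V2),
    d2.items = d1.items.map (fun kv => (kv.1, F kv.2)) →
    (ts.foldl (fun d t => d.insert (key t) (g2 t)) d2).items
    = (ts.foldl (fun d t => d.insert (key t) (g1 t)) d1).items.map (fun kv => (kv.1, F kv.2)) := by
  intro ts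
  induction ts with
  | nil => intro d1 d2 h; exact h
  | cons t rest ih =>
    intro d1 d2 h
    simp only [List.foldl_cons]
    apply ih
    have hkeyseq : d2.items.map (·.1) = d1.items.map (·.1) := by
      rw [h, List.map_map]
      rfl
    have hcont : d2.contains (key t) = d1.contains (key t) := by
      rw [PySem.Dict.contains_eq_decide_mem_keys, PySem.Dict.contains_eq_decide_mem_keys]
      apply decide_eq_decide.mpr
      simp only [PySem.Dict.keys]
      rw [hkeyseq]
    rw [PySem.Dict.items_insert, PySem.Dict.items_insert, hcont]
    by_cases hc : d1.contains (key t) = true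
    · rw [if_pos hc, if_pos hc, h, List.map_map, List.map_map]
      apply List.map_congr_left
      intro kv _
      by_cases hk : kv.1 = key t
      · simp [Function.comp, hk, hg t]
      · simp [Function.comp, hk]
    · rw [if_neg hc, if_neg hc, h, List.map_append]
      simp [hg t]

def pvStep (k1 : String → Int) (mm x : String) : String :=
  if (decide (k1 x < k1 mm) || !decide (k1 mm < k1 x) && decide (x < mm)) = true then x else mm

theorem min2_eq_fold (k1 : String → Int) : ∀ (xs : List String) (m : String),
    PySem.List.min2? (m :: xs) k1 (fun k => k) = some (xs.foldl (pvStep k1) m) := by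
  intro xs
  induction xs with
  | nil => intro m; rfl
  | cons x rest ih =>
    intro m
    simp only [PySem.List.min2?, List.foldl_cons]
    by_cases hC : (decide (k1 x < k1 m) || !decide (k1 m < k1 x) && decide (x < m)) = true
    · rw [if_pos hC, show pvStep k1 m x = x from by unfold pvStep; rw [if_pos hC]]
      have ih' := ih x
      simp only [PySem.List.min2?, List.foldl_cons] at ih'
      exact ih'
    · rw [if_neg hC, show pvStep k1 m x = m from by unfold pvStep; rw [if_neg hC]]
      have ih' := ih m
      simp only [PySem.List.min2?, List.foldl_cons] at ih'
      exact ih'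

theorem pvStep_cases (k1 : String → Int) (m x : String) :
    (pvStep k1 m x = x ∧ myLE k1 x m) ∨ (pvStep k1 m x = m ∧ myLE k1 m x) := by
  unfold pvStep
  split_ifs with hC
  · left
    refine ⟨rfl, ?_⟩
    simp only [Bool.or_eq_true, Bool.and_eq_true, Bool.not_eq_eq_eq_not, Bool.not_true,
      decide_eq_true_eq, decide_eq_false_iff_not] at hC
    rcases hC with hC | ⟨h5, h6⟩
    · exact Or.inl hC
    · rcases lt_or_eq_of_le (not_lt.mp h5) with hlt | heq
      · exact Or.inl hlt
      · exact Or.inr ⟨heq, le_of_lt h6⟩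
  · right
    refine ⟨rfl, ?_⟩
    simp only [Bool.or_eq_true, Bool.and_eq_true, Bool.not_eq_eq_eq_not, Bool.not_true,
      decide_eq_true_eq, decide_eq_false_iff_not, not_or, not_and] at hC
    obtain ⟨h5, h6⟩ := hC
    rcases lt_or_eq_of_le (not_lt.mp h5) with hlt | heq
    · exact Or.inl hlt
    · exact Or.inr ⟨heq, not_lt.mp (h6 (not_lt.mpr (le_of_eq heq.symm)))⟩

theorem min2_go (k1 : String → Int) : ∀ (xs : List String) (m : String),
    (xs.foldl (pvStep k1) m = m ∨ xs.foldl (pvStep k1) m ∈ xs)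
    ∧ myLE k1 (xs.foldl (pvStep k1) m) m ∧ ∀ y ∈ xs, myLE k1 (xs.foldl (pvStep k1) m) y := by
  intro xs
  induction xs with
  | nil =>
    intro m
    exact ⟨Or.inl rfl, Or.inr ⟨rfl, le_refl m⟩, by simp⟩
  | cons x rest ih =>
    intro m
    simp only [List.foldl_cons]
    obtain ⟨h1, h2, h3⟩ := ih (pvStep k1 m x)
    rcases pvStep_cases k1 m x with ⟨he, hle⟩ | ⟨he, hle⟩ <;> rw [he] at h1 h2 h3 ⊢
    · refine ⟨?_, myLE_trans h2 hle, ?_⟩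
      · rcases h1 with h | h
        · exact Or.inr (by rw [h]; exact List.mem_cons_self)
        · exact Or.inr (List.mem_cons_of_mem _ h)
      · intro y hy
        rcases List.mem_cons.mp hy with rfl | hmem
        · exact h2
        · exact h3 y hmem
    · refine ⟨?_, h2, ?_⟩
      · rcases h1 with h | h
        · exact Or.inl h
        · exact Or.inr (List.mem_cons_of_mem _ h)
      · intro y hy
        rcases List.mem_cons.mp hy with rfl | hmem
        · exact myLE_trans h2 hle
        · exact h3 y hmem

theorem min2_spec (k1 : String → Int) (xs : List String) (hne : xs ≠ []) :
    ∃ m', PySem.List.min2? xs k1 (fun k => k) = some m' ∧ m' ∈ xs ∧ ∀ y ∈ xs, myLE k1 m' y := by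
  cases xs with
  | nil => exact absurd rfl hne
  | cons h t =>
    obtain ⟨h1, h2, h3⟩ := min2_go k1 t h
    refine ⟨t.foldl (pvStep k1) h, ?_, ?_, ?_⟩
    · exact min2_eq_fold k1 t h
    · rcases h1 with hh | hh
      · rw [hh]; exact List.mem_cons_self
      · exact List.mem_cons_of_mem _ hh
    · intro y hy
      rcases List.mem_cons.mp hy with rfl | hmem
      · exact h2
      · exact h3 y hmem

-- the selection step: sorted-filter-max-head = lexicographic min over keys
theorem sel (d : PySem.Dict String Int) (hnd : d.keys.Nodup) (hne : d.items ≠ []) :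
    (PySem.List.pyGet? (PySem.List.sorted
        (d.items.foldl (fun acc kv =>
          if PySem.List.max? d.values (fun v => v) == some kv.2 then acc ++ [kv.1] else acc) [])
        (fun x => x) false) 0).getD ""
    = (PySem.List.min2? d.keys (fun k => -(d.getD k 0)) (fun k => k)).getD "" := by
  have hkeys : d.keys = d.items.map (·.1) := by simp only [PySem.Dict.keys]
  have hvals : d.values = d.items.map (·.2) := by simp only [PySem.Dict.values]
  rw [PySem.List.foldl_append_if (fun kv => PySem.List.max? d.values (fun v => v) == some kv.2)
    (fun kv : String × Int => kv.1) d.items []]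
  cases hM : PySem.List.max? d.values (fun v => v) with
  | none =>
    exact absurd (by rwa [PySem.List.max?_eq_none_iff, hvals, List.map_eq_nil_iff] at hM) hne
  | some M =>
    rw [List.nil_append]
    obtain ⟨kvM, hkvM, hkvM2⟩ : ∃ kv ∈ d.items, kv.2 = M := by
      have := PySem.List.max?_mem hM
      rw [hvals] at this
      obtain ⟨kv, hkv, h2⟩ := List.mem_map.mp this
      exact ⟨kv, hkv, h2⟩
    have hP : ∀ kv : String × Int, ((some M == some kv.2) = true) ↔ kv.2 = M := by
      intro kv
      simp only [beq_iff_eq, Option.some.injEq]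
      exact eq_comm
    have hmem0 : kvM.1 ∈ (d.items.filter (fun kv => some M == some kv.2)).map (fun kv => kv.1) :=
      List.mem_map.mpr ⟨kvM, List.mem_filter.mpr ⟨hkvM, (hP kvM).mpr hkvM2⟩, rfl⟩
    have hansne : (d.items.filter (fun kv => some M == some kv.2)).map (fun kv => kv.1) ≠ [] := by
      intro hnil
      rw [hnil] at hmem0
      exact List.not_mem_nil hmem0
    cases hs : PySem.List.sorted ((d.items.filter (fun kv => some M == some kv.2)).map (fun kv => kv.1)) (fun x => x) false with
    | nil => exact absurd ((PySem.List.sorted_eq_nil_iff _ _ _).mp hs) hansne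
    | cons a0 tl =>
      -- a0 is in the answer list, and its score is M
      have ha0ans : a0 ∈ (d.items.filter (fun kv => some M == some kv.2)).map (fun kv => kv.1) := by
        rw [← PySem.List.mem_sorted _ (fun x : String => x) false, hs]
        exact List.mem_cons_self
      obtain ⟨kva, hkvaf, hkva1⟩ := List.mem_map.mp ha0ans
      obtain ⟨hkvaI, hkvaP⟩ := List.mem_filter.mp hkvaf
      have hkva2 : kva.2 = M := (hP kva).mp hkvaP
      have hga : d.getD a0 0 = M := by
        have : (a0, M) ∈ d.items := by rw [← hkva1, ← hkva2]; exact hkvaI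
        exact PySem.Dict.getD_of_mem_items _ this hnd 0
      have ha0keys : a0 ∈ d.keys := by
        rw [hkeys]
        exact List.mem_map.mpr ⟨kva, hkvaI, hkva1⟩
      -- the min2? minimiser
      have hkne : d.keys ≠ [] := by rw [hkeys]; simpa [List.map_eq_nil_iff] using hne
      obtain ⟨b0, hb0eq, hb0mem, hb0all⟩ := min2_spec (fun k => -(d.getD k 0)) d.keys hkne
      obtain ⟨kvb, hkvbI, hkvb1⟩ := List.mem_map.mp (hkeys ▸ hb0mem)
      have hgb : d.getD b0 0 = kvb.2 := by
        have : (b0, kvb.2) ∈ d.items := by rw [← hkvb1]; exact hkvbI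
        exact PySem.Dict.getD_of_mem_items _ this hnd 0
      have hvleM : kvb.2 ≤ M :=
        PySem.List.max?_isMax hM kvb.2 (by rw [hvals]; exact List.mem_map.mpr ⟨kvb, hkvbI, rfl⟩)
      have hle := hb0all a0 ha0keys
      dsimp only [myLE] at hle
      have hbM : d.getD b0 0 = M ∧ b0 ≤ a0 := by
        rcases hle with hlt | ⟨heq, hble⟩
        · rw [hga, hgb] at hlt
          omega
        · rw [hga] at heq
          exact ⟨by omega, hble⟩
      -- b0 is in the answer list too, so the alphabetically first answer is ≤ b0
      have hb0ans : b0 ∈ (d.items.filter (fun kv => some M == some kv.2)).map (fun kv => kv.1) := by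
        refine List.mem_map.mpr ⟨kvb, List.mem_filter.mpr ⟨hkvbI, ?_⟩, hkvb1⟩
        rw [hP kvb, ← hgb, hbM.1]
      have hab := PySem.List.key_head_sorted_le _ (fun x : String => x) hs b0 hb0ans
      have hfin : a0 = b0 := le_antisymm hab hbM.2
      have hget0 : PySem.List.pyGet? (a0 :: tl) 0 = some a0 := by
        simp [PySem.List.pyGet?, PySem.List.pyIdx?]
      rw [hb0eq, hget0, hfin]

theorem main_eq (table : List String) (languages : List String) (preference : List Int)
    (hpre : table ≠ []) : solution table languages preference = solution_alt table languages preference := by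
  simp only [solution, solution_alt]
  have hfunA : (fun (d : PySem.Dict String (List (Option String))) (t : String) =>
      d.insert (((PySem.Str.split? t " ").getD []).headD "")
        (none :: ((PySem.List.slice ((PySem.Str.split? t " ").getD []) (some 1) none).reverse.map some)))
      = (fun d t => d.insert (pvName t) (pvConv t)) := by
    funext d t
    unfold pvName pvConv pvLangs pvWord
    rw [PySem.List.slice_from_one, List.drop_one]
  rw [hfunA]
  have hfunB : (fun (sc : PySem.Dict String Int) (t : String) =>
      sc.insert (((PySem.Str.split? t " ").getD []).headD "")
        (((PySem.List.enumerate (((PySem.Str.split? t " ").getD []).drop 1)).foldl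
            (fun r il => r.insert il.2 (((((PySem.Str.split? t " ").getD []).drop 1).length : Int) - il.1))
            PySem.Dict.empty).items.foldl
          (fun acc lr => acc + lr.2 * (((preference.zip languages).foldl
              (fun d pl => d.insert pl.2 (d.getD pl.2 0 + pl.1)) PySem.Dict.empty).getD lr.1 0)) 0))
      = (fun sc t => sc.insert (pvName t) (pvScoreB (preference.zip languages) t)) := by
    funext sc t
    unfold pvScoreB pvRank pvWt pvName pvLangs pvWord
    rfl
  rw [hfunB]
  -- the table dict shared by the two sides
  have hndtd : (table.foldl (fun d t => d.insert (pvName t) (pvConv t)) PySem.Dict.empty).keys.Nodup :=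
    PySem.Dict.nodup_keys_foldl_insert_key table pvName (fun _ t => pvConv t) _ PySem.Dict.nodup_keys_empty
  have hstep : ∀ (r : PySem.Dict String Int) (kv : String × List (Option String)),
      (preference.zip languages).foldl (fun r pl => match PySem.List.index? kv.2 (some pl.2) with
        | some i => r.insert kv.1 (r.getD kv.1 0 + (i : Int) * pl.1) | none => r) (r.insert kv.1 0)
      = r.insert kv.1 (0 + pvSA kv.2 (preference.zip languages)) :=
    fun r kv => inner_fold kv.2 kv.1 (preference.zip languages) r 0
  have hresit : ((table.foldl (fun d t => d.insert (pvName t) (pvConv t)) PySem.Dict.empty).items.foldl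
      (fun r kv => (preference.zip languages).foldl (fun r pl => match PySem.List.index? kv.2 (some pl.2) with
        | some i => r.insert kv.1 (r.getD kv.1 0 + (i : Int) * pl.1) | none => r) (r.insert kv.1 0))
      PySem.Dict.empty).items
      = (table.foldl (fun d t => d.insert (pvName t) (pvConv t)) PySem.Dict.empty).items.map
          (fun kv => (kv.1, 0 + pvSA kv.2 (preference.zip languages))) := by
    rw [PySem.List.foldl_congr_mem _ _
      (fun r kv => r.insert kv.1 (0 + pvSA kv.2 (preference.zip languages))) _
      (fun acc kv _ => hstep acc kv)]
    rw [PySem.Dict.items_foldl_insert_fresh _ Prod.fst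
      (fun kv => 0 + pvSA kv.2 (preference.zip languages)) PySem.Dict.empty
      (fun a _ => PySem.Dict.contains_empty _) (by simpa only [PySem.Dict.keys] using hndtd)]
    rfl
  have hscit : (table.foldl (fun sc t => sc.insert (pvName t) (pvScoreB (preference.zip languages) t)) PySem.Dict.empty).items
      = (table.foldl (fun d t => d.insert (pvName t) (pvConv t)) PySem.Dict.empty).items.map
          (fun kv => (kv.1, 0 + pvSA kv.2 (preference.zip languages))) :=
    parfold (fun v => 0 + pvSA v (preference.zip languages)) pvName pvConv
      (pvScoreB (preference.zip languages)) (fun t => row_eq (preference.zip languages) t)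
      table PySem.Dict.empty PySem.Dict.empty rfl
  have hdicts : ((table.foldl (fun d t => d.insert (pvName t) (pvConv t)) PySem.Dict.empty).items.foldl
      (fun r kv => (preference.zip languages).foldl (fun r pl => match PySem.List.index? kv.2 (some pl.2) with
        | some i => r.insert kv.1 (r.getD kv.1 0 + (i : Int) * pl.1) | none => r) (r.insert kv.1 0))
      PySem.Dict.empty)
      = table.foldl (fun sc t => sc.insert (pvName t) (pvScoreB (preference.zip languages) t)) PySem.Dict.empty :=
    PySem.Dict.ext (hresit.trans hscit.symm)
  rw [hdicts]
  have hndsc : (table.foldl (fun sc t => sc.insert (pvName t) (pvScoreB (preference.zip languages) t)) PySem.Dict.empty).keys.Nodup :=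
    PySem.Dict.nodup_keys_foldl_insert_key table pvName
      (fun _ t => pvScoreB (preference.zip languages) t) _ PySem.Dict.nodup_keys_empty
  have hnesc : (table.foldl (fun sc t => sc.insert (pvName t) (pvScoreB (preference.zip languages) t)) PySem.Dict.empty).items ≠ [] := by
    have hk : (table.foldl (fun sc t => sc.insert (pvName t) (pvScoreB (preference.zip languages) t)) PySem.Dict.empty).keys
        = PySem.Set.update PySem.Dict.empty.keys (table.map pvName) :=
      PySem.Dict.keys_foldl_insert_key table pvName
        (fun _ t => pvScoreB (preference.zip languages) t) PySem.Dict.empty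
    intro hnil
    have : (table.foldl (fun sc t => sc.insert (pvName t) (pvScoreB (preference.zip languages) t)) PySem.Dict.empty).keys = [] := by
      simp only [PySem.Dict.keys, hnil, List.map_nil]
    rw [hk] at this
    cases table with
    | nil => exact hpre rfl
    | cons t0 rest =>
      rw [show PySem.Dict.empty.keys = ([] : List String) from rfl, PySem.Set.update_nil_left,
        List.map_cons, PySem.Set.ofList_cons] at this
      exact List.cons_ne_nil _ _ this
  exact sel _ hndsc hnesc

-- ===== VERDICT (by name: the statement is the Claim_ definition above) =====
theorem solution_spec : Claim_equal_solution := by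
  intro table languages preference _ hpre
  unfold Spec_solution
  exact main_eq table languages preference hpre
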